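-- pv_equiv track=rewrite | github.com/annaulazar/algorithms_practice | Trenirovka_7_0/Prefsumm_treeset/task_e.py | get_treeset
-- ===== SOURCE A (Python) =====
-- def get_treeset(array):
--     degree_two = 0
--     while 2 ** degree_two < len(array):
--         degree_two += 1
--     size = 2 ** degree_two
--     tree_set = [0] * (size * 2 - 1)  # кол-во нулей
--     for i in range(len(array)):
--         if array[i] == 0:
--             tree_set[i + size - 1] = 1
--         else:
--             tree_set[i + size - 1] = 0
--     for j in range(size - 2, -1, -1):
--         left_child = tree_set[2 * j + 1]
--         right_child = tree_set[2 * j + 2]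
--         tree_set[j] = left_child + right_child
--
--     return tree_set, size
-- ===== SOURCE B (Python) =====
-- def get_treeset(array):
--     n = len(array)
--     size = 1
--     while size < n:
--         size *= 2
--     tree_set = [0] * (2 * size - 1)
--
--     def build(node, lo, hi):
--         if hi - lo <= 1:
--             tree_set[node] = 1 if lo < n and array[lo] == 0 else 0
--         else:
--             mid = (lo + hi) // 2
--             build(2 * node + 1, lo, mid)
--             build(2 * node + 2, mid, hi)
--             tree_set[node] = tree_set[2 * node + 1] + tree_set[2 * node + 2]
--
--     build(0, 0, size)
--     return tree_set, size
-- ===== Notes on version B (the rewrite author's own statement) =====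
-- stated objective: alternative
-- what changed: replaces A's two iterative index loops (leaf fill, then bottom-up parent loop) with a top-down recursive divide-and-conquer build over segments, and computes the tree size by doubling instead of an exponent search
import Mathlib
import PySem

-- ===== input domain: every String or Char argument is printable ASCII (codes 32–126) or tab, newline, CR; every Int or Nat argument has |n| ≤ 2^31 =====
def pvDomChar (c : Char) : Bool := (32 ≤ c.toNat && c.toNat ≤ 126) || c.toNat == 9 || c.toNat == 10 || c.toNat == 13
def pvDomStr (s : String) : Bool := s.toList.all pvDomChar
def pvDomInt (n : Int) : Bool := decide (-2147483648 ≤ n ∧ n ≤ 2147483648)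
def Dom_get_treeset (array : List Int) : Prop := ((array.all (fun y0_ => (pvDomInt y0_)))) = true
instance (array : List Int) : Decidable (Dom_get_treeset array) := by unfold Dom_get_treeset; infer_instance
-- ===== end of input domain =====

-- B replaces A's two iterative index loops by a top-down recursive segment-tree build
-- (and a doubling loop for the size); same exact return value, no speed claim.


-- ===== PORT A =====
-- 'while 2 ** degree_two < len(array): degree_two += 1'
def getTreesetDegree (n d : Nat) : Nat :=
  if 2 ^ d < n then getTreesetDegree n (d + 1) else d
termination_by n - 2 ^ d
decreasing_by
  have h1 : 1 ≤ 2 ^ d := Nat.one_le_two_pow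
  simp only [Nat.pow_succ]; omega

def get_treeset (array : List Int) : List Int × Int :=
  let size : Nat := 2 ^ getTreesetDegree array.length 0
  let tree0 : List Int := List.replicate (size * 2 - 1) 0
  -- 'for i in range(len(array)): …' (all indices are in range, so pyGetD/pySetD are exact)
  let tree1 := (List.range array.length).foldl (fun (t : List Int) (i : Nat) =>
    if PySem.List.pyGetD array (i : Int) 0 = 0
    then PySem.List.pySetD t ((i : Int) + (size : Int) - 1) 1
    else PySem.List.pySetD t ((i : Int) + (size : Int) - 1) 0) tree0
  -- 'for j in range(size - 2, -1, -1): …'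
  let tree2 := (PySem.List.pyRange ((size : Int) - 2) (-1) (-1)).foldl (fun t j =>
    let left := PySem.List.pyGetD t (2 * j + 1) 0
    let right := PySem.List.pyGetD t (2 * j + 2) 0
    PySem.List.pySetD t j (left + right)) tree1
  (tree2, (size : Int))

-- ===== PORT B =====
-- 'size = 1; while size < n: size *= 2'
def altSize (n size : Nat) : Nat :=
  if size = 0 then 0   -- totality guard only: B always starts from size = 1
  else if size < n then altSize n (size * 2) else size
termination_by n - size
decreasing_by omega

-- recursive 'build(node, lo, hi)' threading the mutated tree_set list
def altBuild (array : List Int) (node lo hi : Nat) (t : List Int) : List Int :=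
  if hi - lo ≤ 1 then
    PySem.List.pySetD t (node : Int)
      (if lo < array.length ∧ PySem.List.pyGetD array (lo : Int) 0 = 0 then 1 else 0)
  else
    let mid := (lo + hi) / 2
    let t1 := altBuild array (2 * node + 1) lo mid t
    let t2 := altBuild array (2 * node + 2) mid hi t1
    PySem.List.pySetD t2 (node : Int)
      (PySem.List.pyGetD t2 (2 * (node : Int) + 1) 0 + PySem.List.pyGetD t2 (2 * (node : Int) + 2) 0)
termination_by hi - lo
decreasing_by all_goals omega

def get_treeset_alt (array : List Int) : List Int × Int :=
  let size := altSize array.length 1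
  let tree0 : List Int := List.replicate (2 * size - 1) 0
  (altBuild array 0 0 size tree0, (size : Int))

-- ===== PRECONDITION & SPEC =====
def Spec_get_treeset (array : List Int) (out : List Int × Int) : Prop := out = get_treeset_alt array
instance (array : List Int) (out : List Int × Int) : Decidable (Spec_get_treeset array out) := by unfold Spec_get_treeset; infer_instance

-- ===== CLAIM (what is proved, stated in full; the proofs are below) =====
def Claim_equal_get_treeset : Prop := ∀ (array : List Int), Dom_get_treeset array → Spec_get_treeset array (get_treeset array)

-- ===== LEMMAS AND PROOFS =====

-- the canonical tree value at node j: leaves are the (padded) zero-indicators, inner nodes sums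
def treeF (array : List Int) (size j : Nat) : Int :=
  if size - 1 ≤ j then
    (if h : j - (size - 1) < array.length then (if array[j - (size - 1)] = 0 then (1 : Int) else 0) else 0)
  else treeF array size (2 * j + 1) + treeF array size (2 * j + 2)
termination_by size - 1 - j
decreasing_by all_goals omega

lemma getD_set' (l : List Int) (n m : Nat) (a : Int) :
    (l.set n a).getD m 0 = if n = m ∧ n < l.length then a else l.getD m 0 := by
  simp only [List.getD, List.getElem?_set]
  split_ifs with h1 h2 h3 <;> simp_all
  omega

lemma altSize_eq (n d : Nat) : altSize n (2 ^ d) = 2 ^ getTreesetDegree n d := by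
  fun_induction getTreesetDegree n d with
  | case1 d h ih =>
      rw [altSize]
      have h1 : 1 ≤ 2 ^ d := Nat.one_le_two_pow
      have h2 : 2 ^ d * 2 = 2 ^ (d + 1) := (Nat.pow_succ ..).symm
      simp only [if_neg (by omega : ¬ 2 ^ d = 0), if_pos h, h2, ih]
  | case2 d h =>
      rw [altSize]
      have h1 : 1 ≤ 2 ^ d := Nat.one_le_two_pow
      simp [h]

lemma le_pow_degree (n d : Nat) : n ≤ 2 ^ getTreesetDegree n d := by
  fun_induction getTreesetDegree n d with
  | case1 d h ih => exact ih
  | case2 d h => omega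

-- descendant predicate: i is in the subtree of 'node' within d levels
abbrev Desc (node d i : Nat) : Prop :=
  ((List.range (d + 1)).any fun e =>
    decide (2 ^ e * (node + 1) ≤ i + 1) && decide (i + 1 < 2 ^ e * (node + 2))) = true

lemma Desc_iff (node d i : Nat) :
    Desc node d i ↔ ∃ e ≤ d, 2 ^ e * (node + 1) ≤ i + 1 ∧ i + 1 < 2 ^ e * (node + 2) := by
  simp [Desc, List.any_eq_true, List.mem_range]

lemma Desc_zero (node i : Nat) : Desc node 0 i ↔ i = node := by
  rw [Desc_iff]
  constructor
  · rintro ⟨e, he, h1, h2⟩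
    interval_cases e
    simp at h1 h2; omega
  · rintro rfl; exact ⟨0, le_refl _, by omega, by omega⟩

lemma Desc_succ (node d i : Nat) :
    Desc node (d + 1) i ↔ i = node ∨ Desc (2 * node + 1) d i ∨ Desc (2 * node + 2) d i := by
  simp only [Desc_iff]
  constructor
  · rintro ⟨e, he, h1, h2⟩
    match e with
    | 0 => left; simp at h1 h2; omega
    | e + 1 =>
      have hA : 2 ^ (e + 1) * (node + 1) = 2 * (2 ^ e * (node + 1)) := by ring
      have hB : 2 ^ (e + 1) * (node + 2) = 2 * (2 ^ e * (node + 2)) := by ring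
      have hC : 2 ^ e * (2 * node + 1 + 1) = 2 * (2 ^ e * (node + 1)) := by ring
      have hD : 2 ^ e * (2 * node + 1 + 2) = 2 ^ e * (node + 1) + 2 ^ e * (node + 2) := by ring
      have hE : 2 ^ e * (2 * node + 2 + 1) = 2 ^ e * (node + 1) + 2 ^ e * (node + 2) := by ring
      have hF : 2 ^ e * (2 * node + 2 + 2) = 2 * (2 ^ e * (node + 2)) := by ring
      by_cases hm : i + 1 < 2 ^ e * (node + 1) + 2 ^ e * (node + 2)
      · exact Or.inr (Or.inl ⟨e, by omega, by omega, by omega⟩)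
      · exact Or.inr (Or.inr ⟨e, by omega, by omega, by omega⟩)
  · rintro (rfl | ⟨e, he, h1, h2⟩ | ⟨e, he, h1, h2⟩)
    · exact ⟨0, by omega, by omega, by omega⟩
    · have hC : 2 ^ e * (2 * node + 1 + 1) = 2 ^ (e + 1) * (node + 1) := by ring
      have hD : 2 ^ e * (2 * node + 1 + 2) = 2 ^ e * (node + 1) + 2 ^ e * (node + 2) := by ring
      have hE : 2 ^ (e + 1) * (node + 2) = 2 * (2 ^ e * (node + 2)) := by ring
      have h0 : 2 ^ e * (node + 1) ≤ 2 ^ e * (node + 2) := by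
        exact Nat.mul_le_mul_left _ (by omega)
      exact ⟨e + 1, by omega, by omega, by omega⟩
    · have hC : 2 ^ e * (2 * node + 2 + 1) = 2 ^ e * (node + 1) + 2 ^ e * (node + 2) := by ring
      have hD : 2 ^ e * (2 * node + 2 + 2) = 2 ^ (e + 1) * (node + 2) := by ring
      have hE : 2 ^ (e + 1) * (node + 1) = 2 * (2 ^ e * (node + 1)) := by ring
      have h0 : 2 ^ e * (node + 1) ≤ 2 ^ e * (node + 2) := by
        exact Nat.mul_le_mul_left _ (by omega)
      exact ⟨e + 1, by omega, by omega, by omega⟩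

lemma Desc_self (node d : Nat) : Desc node d node :=
  (Desc_iff node d node).mpr ⟨0, Nat.zero_le _, by simp, by simp⟩

lemma Desc_all (k i : Nat) (h : i < 2 ^ (k + 1) - 1) : Desc 0 k i := by
  have h0 : i + 1 ≠ 0 := by omega
  have h1 : 2 ^ Nat.log2 (i + 1) ≤ i + 1 := Nat.log2_self_le h0
  have h2 : i + 1 < 2 ^ (Nat.log2 (i + 1) + 1) := Nat.lt_log2_self
  have h3 : Nat.log2 (i + 1) ≤ k := by
    by_contra hc
    have : 2 ^ (k + 1) ≤ 2 ^ Nat.log2 (i + 1) :=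
      Nat.pow_le_pow_right (by omega) (by omega)
    omega
  exact (Desc_iff 0 k i).mpr ⟨Nat.log2 (i + 1), h3, by omega, by rw [Nat.mul_two]; omega⟩

lemma treeF_leaf (array : List Int) (size i : Nat) (h : size - 1 ≤ i) :
    treeF array size i =
      if h2 : i - (size - 1) < array.length then
        (if array[i - (size - 1)] = 0 then (1 : Int) else 0) else 0 := by
  rw [treeF, if_pos h]

lemma altBuild_spec (array : List Int) (size : Nat) :
    ∀ (d node lo : Nat) (t : List Int),
      t.length = 2 * size - 1 →
      lo + size = (node + 1) * 2 ^ d →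
      lo + 2 ^ d ≤ size →
      (altBuild array node lo (lo + 2 ^ d) t).length = 2 * size - 1 ∧
      ∀ i, i < 2 * size - 1 →
        (altBuild array node lo (lo + 2 ^ d) t).getD i 0 =
          if Desc node d i then treeF array size i else t.getD i 0 := by
  intro d
  induction d with
  | zero =>
    intro node lo t hlen hcorr hle
    simp only [pow_zero, Nat.mul_one] at hcorr hle ⊢
    rw [altBuild, if_pos (by omega), PySem.List.pySetD_natCast, PySem.List.pyGetD_natCast]
    have hN : node < 2 * size - 1 := by omega
    have hTF : treeF array size node =
        (if lo < array.length ∧ array.getD lo 0 = 0 then (1 : Int) else 0) := by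
      rw [treeF_leaf array size node (by omega)]
      have hsub : node - (size - 1) = lo := by omega
      rw [hsub]
      by_cases hl : lo < array.length
      · rw [dif_pos hl]
        have hgd : array.getD lo 0 = array[lo] := List.getD_eq_getElem _ _ hl
        rw [hgd]
        by_cases hz : array[lo] = 0 <;> simp [hl, hz]
      · rw [dif_neg hl, if_neg (fun h => hl h.1)]
    refine ⟨by rw [List.length_set, hlen], fun i hi => ?_⟩
    rw [getD_set']
    by_cases hieq : i = node
    · subst hieq
      rw [if_pos ⟨rfl, by omega⟩, if_pos ((Desc_zero i i).mpr rfl), hTF]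
    · rw [if_neg (fun h => hieq h.1.symm), if_neg (fun h => hieq ((Desc_zero node i).mp h))]
  | succ d ihd =>
    intro node lo t hlen hcorr hle
    have hp : (2 : Nat) ^ (d + 1) = 2 * 2 ^ d := by ring
    have hp1 : 1 ≤ (2 : Nat) ^ d := Nat.one_le_two_pow
    rw [show lo + 2 ^ (d + 1) = lo + 2 ^ d + 2 ^ d from by omega] at hle ⊢
    have hg : ¬ (lo + 2 ^ d + 2 ^ d - lo ≤ 1) := by omega
    have hmid : (lo + (lo + 2 ^ d + 2 ^ d)) / 2 = lo + 2 ^ d := by omega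
    rw [altBuild, if_neg hg]
    simp only [hmid]
    have hmul : (node + 2) * 2 ≤ (node + 2) * 2 ^ (d + 1) :=
      Nat.mul_le_mul_left _ (by omega)
    have heq2 : (node + 2) * 2 ^ (d + 1) = (node + 1) * 2 ^ (d + 1) + 2 ^ (d + 1) := by ring
    have hnodesz : node + 2 ≤ size := by omega
    obtain ⟨hl1, hl2⟩ := ihd (2 * node + 1) lo t hlen
      (by have : (2 * node + 1 + 1) * 2 ^ d = (node + 1) * 2 ^ (d + 1) := by ring
          omega)
      (by omega)
    obtain ⟨hr1, hr2⟩ := ihd (2 * node + 2) (lo + 2 ^ d)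
      (altBuild array (2 * node + 1) lo (lo + 2 ^ d) t) hl1
      (by have : (2 * node + 2 + 1) * 2 ^ d = (node + 1) * 2 ^ (d + 1) + 2 ^ d := by ring
          omega)
      (by omega)
    have e1 : 2 * ((node : Nat) : Int) + 1 = ((2 * node + 1 : Nat) : Int) := by push_cast; ring
    have e2 : 2 * ((node : Nat) : Int) + 2 = ((2 * node + 2 : Nat) : Int) := by push_cast; ring
    rw [e1, e2, PySem.List.pyGetD_natCast, PySem.List.pyGetD_natCast, PySem.List.pySetD_natCast]
    have hnd : ¬ Desc (2 * node + 2) d (2 * node + 1) := by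
      intro hD
      obtain ⟨e, he, hx1, hx2⟩ := (Desc_iff _ _ _).mp hD
      have h1e : 1 ≤ 2 ^ e := Nat.one_le_two_pow
      have : 1 * (2 * node + 2 + 1) ≤ 2 ^ e * (2 * node + 2 + 1) :=
        Nat.mul_le_mul_right _ h1e
      omega
    have hT : treeF array size node =
        treeF array size (2 * node + 1) + treeF array size (2 * node + 2) := by
      rw [treeF, if_neg (by omega)]
    rw [hr2 (2 * node + 1) (by omega), if_neg hnd, hl2 (2 * node + 1) (by omega),
      if_pos (Desc_self _ _), hr2 (2 * node + 2) (by omega), if_pos (Desc_self _ _), ← hT]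
    refine ⟨by rw [List.length_set, hr1], fun i hi => ?_⟩
    rw [getD_set']
    by_cases hcase : i = node
    · subst hcase
      rw [if_pos ⟨rfl, by omega⟩, if_pos ((Desc_succ i d i).mpr (Or.inl rfl))]
    · rw [if_neg (fun h => hcase h.1.symm), hr2 i hi, hl2 i hi]
      have hsucc := Desc_succ node d i
      by_cases hR : Desc (2 * node + 2) d i
      · rw [if_pos hR, if_pos (hsucc.mpr (Or.inr (Or.inr hR)))]
      · by_cases hL : Desc (2 * node + 1) d i
        · rw [if_neg hR, if_pos hL, if_pos (hsucc.mpr (Or.inr (Or.inl hL)))]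
        · rw [if_neg hR, if_neg hL, if_neg (fun h => match hsucc.mp h with
            | Or.inl h => hcase h
            | Or.inr (Or.inl h) => hL h
            | Or.inr (Or.inr h) => hR h)]

lemma leafLoop_spec (array : List Int) (size : Nat) (hn : array.length ≤ size) (hs : 1 ≤ size) :
    ∀ m, m ≤ array.length →
      ((List.range m).foldl (fun (t : List Int) (i : Nat) =>
        if PySem.List.pyGetD array (i : Int) 0 = 0
        then PySem.List.pySetD t ((i : Int) + (size : Int) - 1) 1
        else PySem.List.pySetD t ((i : Int) + (size : Int) - 1) 0)
        (List.replicate (size * 2 - 1) 0)).length = size * 2 - 1 ∧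
      ∀ i, i < size * 2 - 1 →
        ((List.range m).foldl (fun (t : List Int) (i : Nat) =>
          if PySem.List.pyGetD array (i : Int) 0 = 0
          then PySem.List.pySetD t ((i : Int) + (size : Int) - 1) 1
          else PySem.List.pySetD t ((i : Int) + (size : Int) - 1) 0)
          (List.replicate (size * 2 - 1) 0)).getD i 0 =
          if size - 1 ≤ i ∧ i - (size - 1) < m then treeF array size i else 0 := by
  intro m
  induction m with
  | zero =>
    intro _
    simp only [List.range_zero, List.foldl_nil]
    refine ⟨by simp, fun i hi => ?_⟩
    rw [if_neg (by omega)]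
    simp [List.getD, hi]
  | succ m ih =>
    intro hm
    obtain ⟨ihl, ihv⟩ := ih (by omega)
    simp only [List.range_succ, List.foldl_append, List.foldl_cons, List.foldl_nil]
    have hmlt : m < array.length := by omega
    have hcast : ((m : Int) + (size : Int) - 1) = ((m + size - 1 : Nat) : Int) := by omega
    have hidx : m + size - 1 < size * 2 - 1 := by omega
    have hval : PySem.List.pyGetD array (m : Int) 0 = array[m] := by
      rw [PySem.List.pyGetD_natCast, List.getD_eq_getElem _ _ hmlt]
    have hset : ∀ v : Int,
        PySem.List.pySetD ((List.range m).foldl (fun (t : List Int) (i : Nat) =>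
          if PySem.List.pyGetD array (i : Int) 0 = 0
          then PySem.List.pySetD t ((i : Int) + (size : Int) - 1) 1
          else PySem.List.pySetD t ((i : Int) + (size : Int) - 1) 0)
          (List.replicate (size * 2 - 1) 0)) ((m : Int) + (size : Int) - 1) v =
        ((List.range m).foldl (fun (t : List Int) (i : Nat) =>
          if PySem.List.pyGetD array (i : Int) 0 = 0
          then PySem.List.pySetD t ((i : Int) + (size : Int) - 1) 1
          else PySem.List.pySetD t ((i : Int) + (size : Int) - 1) 0)
          (List.replicate (size * 2 - 1) 0)).set (m + size - 1) v := by
      intro v; rw [hcast, PySem.List.pySetD_natCast]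
    have htF : treeF array size (m + size - 1) = (if array[m] = 0 then (1 : Int) else 0) := by
      rw [treeF_leaf array size _ (by omega)]
      have : m + size - 1 - (size - 1) = m := by omega
      rw [this, dif_pos hmlt]
    constructor
    · split_ifs <;> rw [hset, List.length_set, ihl]
    · intro i hi
      have hstep : ∀ v : Int,
          (((List.range m).foldl (fun (t : List Int) (i : Nat) =>
            if PySem.List.pyGetD array (i : Int) 0 = 0
            then PySem.List.pySetD t ((i : Int) + (size : Int) - 1) 1
            else PySem.List.pySetD t ((i : Int) + (size : Int) - 1) 0)
            (List.replicate (size * 2 - 1) 0)).set (m + size - 1) v).getD i 0 =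
          if m + size - 1 = i ∧ m + size - 1 < size * 2 - 1 then v else
            if size - 1 ≤ i ∧ i - (size - 1) < m then treeF array size i else 0 := by
        intro v; rw [getD_set', ihl, ihv i hi]
      by_cases hieq : i = m + size - 1
      · subst hieq
        by_cases hz : PySem.List.pyGetD array (m : Int) 0 = 0
        · rw [if_pos hz, hset, hstep, if_pos ⟨rfl, hidx⟩, if_pos (by omega), htF]
          rw [hval] at hz; simp [hz]
        · rw [if_neg hz, hset, hstep, if_pos ⟨rfl, hidx⟩, if_pos (by omega), htF]
          rw [hval] at hz; simp [hz]
      · have hne : ¬(m + size - 1 = i ∧ m + size - 1 < size * 2 - 1) := by omega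
        have hgoal : (if size - 1 ≤ i ∧ i - (size - 1) < m + 1 then treeF array size i else 0) =
            (if size - 1 ≤ i ∧ i - (size - 1) < m then treeF array size i else 0) := by
          by_cases hc : size - 1 ≤ i ∧ i - (size - 1) < m
          · rw [if_pos hc, if_pos (by omega)]
          · rw [if_neg hc, if_neg (by omega)]
        rw [hgoal]
        by_cases hz : PySem.List.pyGetD array (m : Int) 0 = 0
        · rw [if_pos hz, hset, hstep, if_neg hne]
        · rw [if_neg hz, hset, hstep, if_neg hne]

lemma downLoop_spec (array : List Int) (size : Nat) (hs : 1 ≤ size) :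
    ∀ (m : Nat) (t : List Int), m + 1 < size →
      t.length = 2 * size - 1 →
      (∀ i, m < i → i < 2 * size - 1 → t.getD i 0 = treeF array size i) →
      ((PySem.List.pyRange (m : Int) (-1) (-1)).foldl (fun t j =>
        PySem.List.pySetD t j (PySem.List.pyGetD t (2 * j + 1) 0 + PySem.List.pyGetD t (2 * j + 2) 0)) t).length = 2 * size - 1 ∧
      ∀ i, i < 2 * size - 1 →
        ((PySem.List.pyRange (m : Int) (-1) (-1)).foldl (fun t j =>
          PySem.List.pySetD t j (PySem.List.pyGetD t (2 * j + 1) 0 + PySem.List.pyGetD t (2 * j + 2) 0)) t).getD i 0 =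
          if i ≤ m then treeF array size i else t.getD i 0 := by
  intro m
  induction m with
  | zero =>
    intro t hm hlen hinv
    have hcons : PySem.List.pyRange ((0 : Nat) : Int) (-1) (-1) =
        ((0 : Nat) : Int) :: PySem.List.pyRange (((0 : Nat) : Int) - 1) (-1) (-1) :=
      PySem.List.pyRange_neg_one_cons (by norm_num)
    have hnil : PySem.List.pyRange (((0 : Nat) : Int) - 1) (-1) (-1) = [] :=
      PySem.List.pyRange_neg_one_eq_nil (by norm_num)
    have e1 : 2 * ((0 : Nat) : Int) + 1 = ((1 : Nat) : Int) := by norm_num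
    have e2 : 2 * ((0 : Nat) : Int) + 2 = ((2 : Nat) : Int) := by norm_num
    have hT : treeF array size 0 = treeF array size (2 * 0 + 1) + treeF array size (2 * 0 + 2) := by
      rw [treeF, if_neg (by omega)]
    simp only [hcons, hnil, List.foldl_cons, List.foldl_nil, e1, e2,
      PySem.List.pyGetD_natCast, PySem.List.pySetD_natCast]
    rw [hinv 1 (by omega) (by omega), hinv 2 (by omega) (by omega)]
    have hT' : treeF array size 1 + treeF array size 2 = treeF array size 0 := by
      rw [hT]
    rw [hT']
    refine ⟨by simp [hlen], fun i hi => ?_⟩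
    rw [getD_set']
    by_cases hi0 : i = 0
    · subst hi0; rw [if_pos ⟨rfl, by omega⟩, if_pos (by omega)]
    · rw [if_neg (by omega), if_neg (by omega)]
  | succ m ih =>
    intro t hm hlen hinv
    have hcons : PySem.List.pyRange ((m + 1 : Nat) : Int) (-1) (-1) =
        ((m + 1 : Nat) : Int) :: PySem.List.pyRange (((m + 1 : Nat) : Int) - 1) (-1) (-1) :=
      PySem.List.pyRange_neg_one_cons (by push_cast; omega)
    have hc2 : ((m + 1 : Nat) : Int) - 1 = ((m : Nat) : Int) := by push_cast; ring
    have e1 : 2 * ((m + 1 : Nat) : Int) + 1 = ((2 * (m + 1) + 1 : Nat) : Int) := by push_cast; ring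
    have e2 : 2 * ((m + 1 : Nat) : Int) + 2 = ((2 * (m + 1) + 2 : Nat) : Int) := by push_cast; ring
    have hT : treeF array size (m + 1) =
        treeF array size (2 * (m + 1) + 1) + treeF array size (2 * (m + 1) + 2) := by
      rw [treeF, if_neg (by omega)]
    simp only [hcons, hc2, List.foldl_cons, e1, e2,
      PySem.List.pyGetD_natCast, PySem.List.pySetD_natCast]
    rw [hinv (2 * (m + 1) + 1) (by omega) (by omega), hinv (2 * (m + 1) + 2) (by omega) (by omega),
      ← hT]
    obtain ⟨ihl, ihv⟩ := ih (t.set (m + 1) (treeF array size (m + 1))) (by omega)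
      (by rw [List.length_set, hlen])
      (by
        intro i h1 h2
        rw [getD_set']
        by_cases hieq : m + 1 = i
        · rw [if_pos ⟨hieq, by omega⟩, ← hieq]
        · rw [if_neg (by omega)]
          exact hinv i (by omega) h2)
    refine ⟨ihl, fun i hi => ?_⟩
    rw [ihv i hi]
    by_cases h1 : i ≤ m
    · rw [if_pos h1, if_pos (by omega)]
    · by_cases h2 : i = m + 1
      · subst h2
        rw [if_neg h1, if_pos (by omega), getD_set', if_pos ⟨rfl, by omega⟩]
      · rw [if_neg h1, if_neg (by omega), getD_set', if_neg (by omega)]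

lemma getTreeset_char (array : List Int) :
    (get_treeset array).2 = ((2 ^ getTreesetDegree array.length 0 : Nat) : Int) ∧
    (get_treeset array).1.length = 2 * 2 ^ getTreesetDegree array.length 0 - 1 ∧
    ∀ i, i < 2 * 2 ^ getTreesetDegree array.length 0 - 1 →
      (get_treeset array).1.getD i 0 = treeF array (2 ^ getTreesetDegree array.length 0) i := by
  have hn : array.length ≤ 2 ^ getTreesetDegree array.length 0 := le_pow_degree _ 0
  have hs : (1 : Nat) ≤ 2 ^ getTreesetDegree array.length 0 := Nat.one_le_two_pow
  obtain ⟨h1l, h1v⟩ :=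
    leafLoop_spec array (2 ^ getTreesetDegree array.length 0) hn hs array.length (le_refl _)
  simp only [get_treeset]
  set size := 2 ^ getTreesetDegree array.length 0 with hsize
  have htree1 : ∀ i, size - 2 < i → i < 2 * size - 1 →
      ((List.range array.length).foldl (fun (t : List Int) (i : Nat) =>
        if PySem.List.pyGetD array (i : Int) 0 = 0
        then PySem.List.pySetD t ((i : Int) + (size : Int) - 1) 1
        else PySem.List.pySetD t ((i : Int) + (size : Int) - 1) 0)
        (List.replicate (size * 2 - 1) 0)).getD i 0 = treeF array size i := by
    intro i h1 h2
    by_cases hc : i - (size - 1) < array.length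
    · rw [h1v i (by omega), if_pos ⟨by omega, hc⟩]
    · rw [h1v i (by omega), if_neg (by omega), treeF_leaf array size i (by omega),
        dif_neg (by omega)]
  by_cases h1 : size = 1
  · rw [h1]
    rw [show ((1 : Nat) : Int) - 2 = (-1 : Int) from by norm_num,
      PySem.List.pyRange_neg_one_eq_nil (by norm_num), List.foldl_nil]
    rw [h1] at h1l h1v hn
    refine ⟨by simp, by rw [h1l], fun i hi => ?_⟩
    have hi0 : i = 0 := by omega
    subst hi0
    by_cases hal : 0 < array.length
    · rw [h1v 0 (by omega), if_pos ⟨by omega, by omega⟩]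
    · rw [h1v 0 (by omega), if_neg (by omega), treeF_leaf array 1 0 (by omega),
        dif_neg (by omega)]
  · have hs2 : 2 ≤ size := by omega
    have hd : ((size : Nat) : Int) - 2 = (((size - 2 : Nat)) : Int) := by omega
    rw [hd]
    obtain ⟨h2l, h2v⟩ := downLoop_spec array size hs (size - 2)
      ((List.range array.length).foldl (fun (t : List Int) (i : Nat) =>
        if PySem.List.pyGetD array (i : Int) 0 = 0
        then PySem.List.pySetD t ((i : Int) + (size : Int) - 1) 1
        else PySem.List.pySetD t ((i : Int) + (size : Int) - 1) 0)
        (List.replicate (size * 2 - 1) 0))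
      (by omega) (by rw [h1l]; omega) htree1
    refine ⟨by simp, by rw [h2l], fun i hi => ?_⟩
    rw [h2v i hi]
    by_cases hc : i ≤ size - 2
    · rw [if_pos hc]
    · rw [if_neg hc, htree1 i (by omega) hi]

lemma getTreesetAlt_char (array : List Int) :
    (get_treeset_alt array).2 = ((2 ^ getTreesetDegree array.length 0 : Nat) : Int) ∧
    (get_treeset_alt array).1.length = 2 * 2 ^ getTreesetDegree array.length 0 - 1 ∧
    ∀ i, i < 2 * 2 ^ getTreesetDegree array.length 0 - 1 →
      (get_treeset_alt array).1.getD i 0 = treeF array (2 ^ getTreesetDegree array.length 0) i := by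
  have hsz : altSize array.length 1 = 2 ^ getTreesetDegree array.length 0 := by
    have h := altSize_eq array.length 0
    norm_num at h
    exact h
  simp only [get_treeset_alt]
  rw [hsz]
  set size := 2 ^ getTreesetDegree array.length 0 with hsize
  obtain ⟨hb1, hb2⟩ := altBuild_spec array size (getTreesetDegree array.length 0) 0 0
    (List.replicate (2 * size - 1) 0)
    (by rw [List.length_replicate]) (by omega) (by omega)
  rw [show (0 : Nat) + 2 ^ getTreesetDegree array.length 0 = size from by omega] at hb1 hb2
  refine ⟨by simp, hb1, fun i hi => ?_⟩
  have hpow : 2 ^ (getTreesetDegree array.length 0 + 1) = 2 * size := by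
    rw [hsize]; ring
  rw [hb2 i hi, if_pos (Desc_all _ i (by omega))]

-- ===== VERDICT (by name: the statement is the Claim_ definition above) =====
theorem get_treeset_spec : Claim_equal_get_treeset := by
  intro array _
  unfold Spec_get_treeset
  obtain ⟨ha2, hal, hav⟩ := getTreeset_char array
  obtain ⟨hb2, hbl, hbv⟩ := getTreesetAlt_char array
  have hfst : (get_treeset array).1 = (get_treeset_alt array).1 := by
    apply List.ext_getElem (by omega)
    intro i h1 h2
    have := (hav i (by omega)).trans (hbv i (by omega)).symm
    rwa [List.getD_eq_getElem _ _ h1, List.getD_eq_getElem _ _ h2] at this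
  exact Prod.ext hfst (ha2.trans hb2.symm)
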